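-- pv_equiv track=rewrite | github.com/abalkhassimtraore/aaaa | Devoir python/Arithmanceur.py | realisation
-- ===== SOURCE A (Python) =====
-- def racine(n):
--     while n > 9:
--         somme = 0
--         while n != 0:
--             somme += n % 10
--             n //= 10
--         n = somme
--     return n
--
-- def switche(res):
--     switcher = {
--         1: "individualite",
--         2: "interaction",
--         3: "completude",
--         4: "stabilite",
--         5: "instabilite",
--         6: "harmonie",
--         7: "empathie",
--         8: "succes",
--         9: "completude"
--     }
--     return switcher.get(res, "ouroboros")
--
-- def realisation(nom):
--     val = {
--         'b': 2, 'c': 3, 'd': 4, 'f': 6, 'g': 7, 'h': 8, 'j': 1, 'k': 2,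
--         'l': 3, 'm': 4, 'n': 5, 'p': 7, 'q': 8, 'r': 9, 's': 1, 't': 2,
--         'v': 4, 'w': 5, 'x': 6, 'z': 8
--     }
--     somme = sum(val[char] for char in nom if char in val)
--     res = racine(somme)
--     return switche(res)
-- ===== SOURCE B (Python) =====
-- VAL = {
--     'b': 2, 'c': 3, 'd': 4, 'f': 6, 'g': 7, 'h': 8, 'j': 1, 'k': 2,
--     'l': 3, 'm': 4, 'n': 5, 'p': 7, 'q': 8, 'r': 9, 's': 1, 't': 2,
--     'v': 4, 'w': 5, 'x': 6, 'z': 8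
-- }
--
-- WORDS = {
--     1: "individualite",
--     2: "interaction",
--     3: "completude",
--     4: "stabilite",
--     5: "instabilite",
--     6: "harmonie",
--     7: "empathie",
--     8: "succes",
--     9: "completude"
-- }
--
-- def realisation(nom):
--     s = sum(VAL.get(c, 0) for c in nom)
--     r = 0 if s == 0 else 1 + (s - 1) % 9
--     return WORDS.get(r, "ouroboros")
-- ===== Notes on version B (the rewrite author's own statement) =====
-- stated objective: idiomatic
-- what changed: The nested digit-summing while-loops (iterated digital root) are replaced by the closed-form formula 0 if s == 0 else 1 + (s - 1) % 9, and the membership-guarded generator becomes a single dict.get with default 0.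
import Mathlib
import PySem

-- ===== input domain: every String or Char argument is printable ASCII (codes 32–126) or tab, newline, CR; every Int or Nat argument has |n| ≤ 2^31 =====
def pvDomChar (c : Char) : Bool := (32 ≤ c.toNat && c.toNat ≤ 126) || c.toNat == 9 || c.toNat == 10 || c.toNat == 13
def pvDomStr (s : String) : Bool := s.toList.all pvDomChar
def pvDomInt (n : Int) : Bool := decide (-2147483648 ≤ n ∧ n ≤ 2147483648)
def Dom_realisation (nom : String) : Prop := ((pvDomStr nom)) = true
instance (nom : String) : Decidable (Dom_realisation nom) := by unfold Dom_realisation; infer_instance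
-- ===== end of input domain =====

-- B replaces A's nested digit-summing while-loops by the closed-form digital root 0 / 1+(s-1)%9 (idiomatic).

-- ===== PORT A =====
-- inner loop of racine: 'while n != 0: somme += n % 10; n //= 10'.
-- fuel is only a totality guard: n.toNat iterations always suffice (the loop variable strictly
-- decreases while positive); for n < 0 the Python loop would not terminate, but racine only
-- ever passes nonnegative arguments.
def racineInnerGo : Nat → Int → Int → Int
  | 0, somme, _ => somme
  | fuel + 1, somme, n =>
    if 0 < n then racineInnerGo fuel (somme + PySem.Int.mod n 10) (PySem.Int.floordiv n 10)
    else somme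

def racineInner (somme n : Int) : Int := racineInnerGo n.toNat somme n

-- outer loop of racine: 'while n > 9: … n = somme'; fuel n.toNat suffices (digit sum < n for n > 9)
def racineGo : Nat → Int → Int
  | 0, n => n
  | fuel + 1, n => if 9 < n then racineGo fuel (racineInner 0 n) else n

def racine (n : Int) : Int := racineGo n.toNat n

def switcherA : PySem.Dict Int String := PySem.Dict.ofList
  [(1, "individualite"), (2, "interaction"), (3, "completude"), (4, "stabilite"),
   (5, "instabilite"), (6, "harmonie"), (7, "empathie"), (8, "succes"), (9, "completude")]

def switche (res : Int) : String := switcherA.getD res "ouroboros"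

def valA : PySem.Dict Char Int := PySem.Dict.ofList
  [('b', 2), ('c', 3), ('d', 4), ('f', 6), ('g', 7), ('h', 8), ('j', 1), ('k', 2),
   ('l', 3), ('m', 4), ('n', 5), ('p', 7), ('q', 8), ('r', 9), ('s', 1), ('t', 2),
   ('v', 4), ('w', 5), ('x', 6), ('z', 8)]

-- sum(val[char] for char in nom if char in val); 'char in val' + 'val[char]' as one get? match
def realisation (nom : String) : String :=
  let somme := nom.toList.foldl
    (fun s c => match valA.get? c with | some v => s + v | none => s) 0
  let res := racine somme
  switche res

-- ===== PORT B =====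
def valB : PySem.Dict Char Int := PySem.Dict.ofList
  [('b', 2), ('c', 3), ('d', 4), ('f', 6), ('g', 7), ('h', 8), ('j', 1), ('k', 2),
   ('l', 3), ('m', 4), ('n', 5), ('p', 7), ('q', 8), ('r', 9), ('s', 1), ('t', 2),
   ('v', 4), ('w', 5), ('x', 6), ('z', 8)]

def wordsB : PySem.Dict Int String := PySem.Dict.ofList
  [(1, "individualite"), (2, "interaction"), (3, "completude"), (4, "stabilite"),
   (5, "instabilite"), (6, "harmonie"), (7, "empathie"), (8, "succes"), (9, "completude")]

def realisation_alt (nom : String) : String :=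
  let s := nom.toList.foldl (fun acc c => acc + valB.getD c 0) 0
  let r := if s = 0 then 0 else 1 + PySem.Int.mod (s - 1) 9
  wordsB.getD r "ouroboros"

-- ===== PRECONDITION & SPEC =====
def Spec_realisation (nom : String) (out : String) : Prop := out = realisation_alt nom
instance (nom : String) (out : String) : Decidable (Spec_realisation nom out) := by unfold Spec_realisation; infer_instance

-- ===== CLAIM (what is proved, stated in full; the proofs are below) =====
def Claim_equal_realisation : Prop := ∀ (nom : String), Dom_realisation nom → Spec_realisation nom (realisation nom)

-- ===== LEMMAS AND PROOFS =====
-- the inner digit-sum loop: bounds, positivity and value mod 9, for any sufficient fuel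
lemma racineInnerGo_spec : ∀ (fuel : Nat) (n somme : Int), 0 ≤ n → n.toNat ≤ fuel →
    racineInnerGo fuel somme n ≤ somme + n ∧
    (10 ≤ n → racineInnerGo fuel somme n < somme + n) ∧
    somme ≤ racineInnerGo fuel somme n ∧
    (1 ≤ n → somme + 1 ≤ racineInnerGo fuel somme n) ∧
    racineInnerGo fuel somme n % 9 = (somme + n) % 9 := by
  intro fuel
  induction fuel with
  | zero => intro n somme hn hf; simp only [racineInnerGo]; omega
  | succ fuel ih =>
    intro n somme hn hf
    simp only [racineInnerGo]
    split_ifs with h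
    · have hmod := PySem.Int.mod_eq_emod_of_pos (a := n) (b := 10) (by omega)
      have hdiv := PySem.Int.floordiv_eq_ediv_of_pos (a := n) (b := 10) (by omega)
      rw [hmod, hdiv]
      have := ih (n / 10) (somme + n % 10) (by omega) (by omega)
      omega
    · omega

lemma racineInner_spec (n somme : Int) (hn : 0 ≤ n) :
    racineInner somme n ≤ somme + n ∧
    (10 ≤ n → racineInner somme n < somme + n) ∧
    somme ≤ racineInner somme n ∧
    (1 ≤ n → somme + 1 ≤ racineInner somme n) ∧
    racineInner somme n % 9 = (somme + n) % 9 :=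
  racineInnerGo_spec n.toNat n somme hn le_rfl

-- the outer loop computes the closed-form digital root, for any sufficient fuel
lemma racineGo_closed : ∀ (fuel : Nat) (n : Int), 0 ≤ n → n.toNat ≤ fuel →
    racineGo fuel n = if n = 0 then 0 else 1 + (n - 1) % 9 := by
  intro fuel
  induction fuel with
  | zero => intro n hn hf; simp only [racineGo]; split_ifs <;> omega
  | succ fuel ih =>
    intro n hn hf
    simp only [racineGo]
    split_ifs with h h0
    · omega
    · have hspec := racineInner_spec n 0 hn
      rw [ih (racineInner 0 n) (by omega) (by omega)]
      rw [if_neg (by omega : ¬ racineInner 0 n = 0)]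
      omega
    · omega
    · omega

lemma racine_closed (n : Int) (hn : 0 ≤ n) :
    racine n = if n = 0 then 0 else 1 + (n - 1) % 9 :=
  racineGo_closed n.toNat n hn le_rfl

lemma valB_eq_valA : valB = valA := rfl

lemma step_eq (s : Int) (c : Char) :
    (match valA.get? c with | some v => s + v | none => s) = s + valB.getD c 0 := by
  rw [valB_eq_valA, PySem.Dict.getD_eq_get?_getD]
  cases valA.get? c <;> simp

lemma valB_getD_nonneg (c : Char) : 0 ≤ valB.getD c 0 := by
  rw [PySem.Dict.getD_eq_get?_getD]
  cases h : valB.get? c with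
  | none => simp
  | some v =>
    have hmem := PySem.Dict.mem_items_of_get?_eq_some (d := valB) h
    have hval : v ∈ valB.values := List.mem_map.mpr ⟨(c, v), hmem, rfl⟩
    have hall : ∀ x ∈ valB.values, (0 : Int) ≤ x := by decide
    simpa using hall v hval

lemma somme_nonneg : ∀ (l : List Char) (s : Int), 0 ≤ s →
    0 ≤ l.foldl (fun acc c => acc + valB.getD c 0) s := by
  intro l
  induction l with
  | nil => intro s hs; simpa using hs
  | cons c l ih =>
    intro s hs
    simp only [List.foldl_cons]
    exact ih _ (by have := valB_getD_nonneg c; omega)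

-- ===== VERDICT (by name: the statement is the Claim_ definition above) =====
theorem realisation_spec : Claim_equal_realisation := by
  intro nom _
  unfold Spec_realisation realisation realisation_alt switche
  have hfun : (fun (s : Int) (c : Char) =>
      match valA.get? c with | some v => s + v | none => s)
      = fun acc c => acc + valB.getD c 0 := by
    funext s c; exact step_eq s c
  rw [hfun]
  set s := nom.toList.foldl (fun acc c => acc + valB.getD c 0) 0 with hs
  have hnn : 0 ≤ s := somme_nonneg nom.toList 0 le_rfl
  have hr : racine s = if s = 0 then 0 else 1 + (s - 1) % 9 := racine_closed s hnn
  have hm : PySem.Int.mod (s - 1) 9 = (s - 1) % 9 :=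
    PySem.Int.mod_eq_emod_of_pos (by omega)
  show switcherA.getD (racine s) "ouroboros"
      = wordsB.getD (if s = 0 then 0 else 1 + PySem.Int.mod (s - 1) 9) "ouroboros"
  rw [hr, hm]
  rfl
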